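-- pv_equiv track=rewrite | github.com/caudate-julie/GoogleCodeJams | Google Code Jam 2019/01 - Round 1B/C.py | fair_fight
-- ===== SOURCE A (Python) =====
-- def fair_fight(C, D, K):
--     count = 0
--     L = 0
--
--     while L < len(C):
--         c_max = L
--         d_max = L
--         R = L
--         while abs(C[c_max] - D[d_max]) > K:
--             R += 1
--             if R >= len(C): break
--             if C[R] > C[c_max]: c_max = R
--             if D[R] > D[d_max]: d_max = R
--
--         L_fix = min(c_max, d_max)
--         R_fix = max(c_max, d_max)
--
--         if abs(C[c_max] - D[d_max]) > K:
--             L = L + 1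
--             continue
--
--         while abs(C[c_max] - D[d_max]) <= K:
--             R += 1
--             if R >= len(C): break
--             if C[R] > C[c_max]: c_max = R
--             if D[R] > D[d_max]: d_max = R
--
--         count += (L_fix - L + 1) * (R - R_fix)
--         L = L + 1
--
--     return count
-- ===== SOURCE B (Python) =====
-- from itertools import accumulate
--
-- def fair_fight(C, D, K):
--     # Prefix-maxima reformulation of the same per-L computation: build running
--     # maxima of both tails at C speed, take the fairness-flag list, locate the
--     # first fair offset and the first unfair offset after it, and recover the
--     # earliest argmax positions by value lookup.
--     n = len(C)
--     total = 0
--     for L in range(n):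
--         mc = list(accumulate(C[L:], max))
--         md = list(accumulate(D[L:n], max))
--         fair = [abs(a - b) <= K for a, b in zip(mc, md)]
--         try:
--             j = fair.index(True)
--         except ValueError:
--             continue
--         cmax = C.index(mc[j], L, L + j + 1)
--         dmax = D.index(md[j], L, L + j + 1)
--         try:
--             j2 = fair.index(False, j + 1)
--         except ValueError:
--             j2 = n - L
--         total += (min(cmax, dmax) - L + 1) * (L + j2 - max(cmax, dmax))
--     return total
-- ===== Notes on version B (the rewrite author's own statement) =====
-- stated objective: alternative
-- what changed: B replaces A's index-tracking while-loops per L by building the running-maxima lists of both tails with itertools.accumulate, locating the first fair and first following unfair offsets in a fairness-flag list, and recovering the earliest argmax positions by value lookup (list.index).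
import Mathlib
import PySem

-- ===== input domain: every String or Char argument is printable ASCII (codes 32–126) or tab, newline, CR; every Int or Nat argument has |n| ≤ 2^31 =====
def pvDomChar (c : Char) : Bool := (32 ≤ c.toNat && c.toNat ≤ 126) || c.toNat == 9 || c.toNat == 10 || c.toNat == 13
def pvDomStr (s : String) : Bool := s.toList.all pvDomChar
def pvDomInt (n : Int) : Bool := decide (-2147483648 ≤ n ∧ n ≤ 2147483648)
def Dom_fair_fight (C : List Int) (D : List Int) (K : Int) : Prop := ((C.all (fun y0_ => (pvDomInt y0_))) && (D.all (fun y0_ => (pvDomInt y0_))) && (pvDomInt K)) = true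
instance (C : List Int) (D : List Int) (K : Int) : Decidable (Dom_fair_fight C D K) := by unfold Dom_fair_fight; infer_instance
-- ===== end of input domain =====

-- B is a prefix-maxima reformulation of the same per-L computation (objective: alternative, not faster).
-- A mutates nothing; equivalence is about the return value.

-- ===== PORT A =====
-- inner `while abs(C[c_max]-D[d_max]) > K` loop; list indexing is `getD _ 0`,
-- exact here since under Pre_ every index used is in range (fuel = n suffices: R strictly increases up to n)
def fairLoop1 (C D : List Int) (K : Int) (n : Nat) : Nat → Nat → Nat → Nat → Nat × Nat × Nat
  | 0, c, d, R => (c, d, R)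
  | fuel+1, c, d, R =>
    if K < |C.getD c 0 - D.getD d 0| then
      if n ≤ R + 1 then (c, d, R + 1)
      else
        fairLoop1 C D K n fuel
          (if C.getD c 0 < C.getD (R+1) 0 then R+1 else c)
          (if D.getD d 0 < D.getD (R+1) 0 then R+1 else d)
          (R+1)
    else (c, d, R)

-- inner `while abs(C[c_max]-D[d_max]) <= K` loop
def fairLoop2 (C D : List Int) (K : Int) (n : Nat) : Nat → Nat → Nat → Nat → Nat × Nat × Nat
  | 0, c, d, R => (c, d, R)
  | fuel+1, c, d, R =>
    if |C.getD c 0 - D.getD d 0| ≤ K then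
      if n ≤ R + 1 then (c, d, R + 1)
      else
        fairLoop2 C D K n fuel
          (if C.getD c 0 < C.getD (R+1) 0 then R+1 else c)
          (if D.getD d 0 < D.getD (R+1) 0 then R+1 else d)
          (R+1)
    else (c, d, R)

-- outer `while L < len(C)` loop (fuel = n suffices: L increases each iteration)
def fairOuter (C D : List Int) (K : Int) (n : Nat) : Nat → Nat → Int → Int
  | 0, _, count => count
  | fuel+1, L, count =>
    if L < n then
      let s := fairLoop1 C D K n n L L L
      let Lfix := min s.1 s.2.1
      let Rfix := max s.1 s.2.1
      if K < |C.getD s.1 0 - D.getD s.2.1 0| then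
        fairOuter C D K n fuel (L+1) count
      else
        let R2 := (fairLoop2 C D K n n s.1 s.2.1 s.2.2).2.2
        fairOuter C D K n fuel (L+1)
          (count + ((Lfix : Int) - (L : Int) + 1) * ((R2 : Int) - (Rfix : Int)))
    else count

def fair_fight (C : List Int) (D : List Int) (K : Int) : Int :=
  fairOuter C D K C.length C.length 0 0

-- ===== PORT B =====
-- itertools.accumulate(xs, max): running maxima
def accMax : Int → List Int → List Int
  | _, [] => []
  | cur, x :: xs => max cur x :: accMax (max cur x) xs

def prefMax : List Int → List Int
  | [] => []
  | x :: xs => x :: accMax x xs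

-- B's loop body; C[L:] is `C.drop L`, D[L:n] is `(D.drop L).take (n-L)` (exact for these
-- nonnegative bounds); list.index(v, a, b) is `a + (window.findIdx (· == v))` — in B the
-- value searched for is always present, so Python's ValueError cannot occur.
def fair_fight_alt (C : List Int) (D : List Int) (K : Int) : Int :=
  (List.range C.length).foldl (fun total L =>
    let n := C.length
    let mc := prefMax (C.drop L)
    let md := prefMax ((D.drop L).take (n - L))
    let fair := List.zipWith (fun a b => decide (|a - b| ≤ K)) mc md
    match fair.findIdx? (· == true) with
    | none => total
    | some j =>
      let cmax := L + ((C.drop L).take (j+1)).findIdx (· == mc.getD j 0)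
      let dmax := L + ((D.drop L).take (j+1)).findIdx (· == md.getD j 0)
      let j2 := match (fair.drop (j+1)).findIdx? (· == false) with
                | some t => j + 1 + t
                | none => n - L
      total + ((min cmax dmax : Int) - (L : Int) + 1) * (((L + j2 : Nat) : Int) - (max cmax dmax : Int))) 0

-- ===== PRECONDITION & SPEC =====
-- A indexes D at positions up to len(C)-1, so it raises IndexError whenever len(D) < len(C);
-- Pre_ excludes exactly those inputs (A returns normally on all others).
def Pre_fair_fight (C : List Int) (D : List Int) (K : Int) : Prop := C.length ≤ D.length
instance (C : List Int) (D : List Int) (K : Int) : Decidable (Pre_fair_fight C D K) := by unfold Pre_fair_fight; infer_instance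
def pvWitness_fair_fight : List Int × List Int × Int := ([1], [1], 0)

def Spec_fair_fight (C : List Int) (D : List Int) (K : Int) (out : Int) : Prop := out = fair_fight_alt C D K
instance (C : List Int) (D : List Int) (K : Int) (out : Int) : Decidable (Spec_fair_fight C D K out) := by unfold Spec_fair_fight; infer_instance

-- ===== CLAIM (what is proved, stated in full; the proofs are below) =====
def Claim_equal_fair_fight : Prop := ∀ (C : List Int) (D : List Int) (K : Int), Dom_fair_fight C D K → Pre_fair_fight C D K → Spec_fair_fight C D K (fair_fight C D K)

-- ===== LEMMAS AND PROOFS =====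


-- invariant of A's running argmaxes over the tail xs (= C.drop L resp. D[L:n]):
-- at window end i the tracked offset γ is the earliest argmax and the prefix max matches
def InvMax (xs : List Int) (i g : Nat) : Prop :=
  g ≤ i ∧ (prefMax xs).getD i 0 = xs.getD g 0 ∧
  (∀ k, k ≤ i → xs.getD k 0 ≤ xs.getD g 0) ∧
  (∀ k, k < g → xs.getD k 0 < xs.getD g 0)

theorem length_accMax (c : Int) (xs : List Int) : (accMax c xs).length = xs.length := by
  induction xs generalizing c with
  | nil => rfl
  | cons x xs ih => simp [accMax, ih]

theorem length_prefMax (xs : List Int) : (prefMax xs).length = xs.length := by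
  cases xs with
  | nil => rfl
  | cons x xs => simp [prefMax, length_accMax]

theorem accMax_getD_zero (c x : Int) (xs : List Int) :
    (accMax c (x :: xs)).getD 0 0 = max c x := rfl

theorem accMax_getD_succ : ∀ (xs : List Int) (c : Int) (i : Nat), i + 1 < xs.length →
    (accMax c xs).getD (i+1) 0 = max ((accMax c xs).getD i 0) (xs.getD (i+1) 0) := by
  intro xs
  induction xs with
  | nil => intro c i h; simp at h
  | cons x xs ih =>
    intro c i h
    cases i with
    | zero =>
      cases xs with
      | nil => simp at h
      | cons y ys => simp [accMax, accMax_getD_zero]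
    | succ i =>
      have h' : i + 1 < xs.length := by simpa using h
      simpa [accMax] using ih (max c x) i h'

theorem prefMax_getD_zero (xs : List Int) : (prefMax xs).getD 0 0 = xs.getD 0 0 := by
  cases xs <;> rfl

theorem prefMax_getD_succ (xs : List Int) (i : Nat) (h : i + 1 < xs.length) :
    (prefMax xs).getD (i+1) 0 = max ((prefMax xs).getD i 0) (xs.getD (i+1) 0) := by
  cases xs with
  | nil => simp at h
  | cons x xs =>
    cases i with
    | zero =>
      cases xs with
      | nil => simp at h
      | cons y ys => simp [prefMax, accMax, accMax_getD_zero]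
    | succ i =>
      have h' : i + 1 < xs.length := by simpa using h
      simpa [prefMax] using accMax_getD_succ xs x i h'

theorem invMax_zero (xs : List Int) : InvMax xs 0 0 := by
  refine ⟨le_refl 0, prefMax_getD_zero xs, fun k hk => ?_, fun k hk => absurd hk (Nat.not_lt_zero k)⟩
  have : k = 0 := Nat.le_zero.mp hk
  simp [this]

theorem invMax_step (xs : List Int) (i g : Nat) (h : i + 1 < xs.length) (hI : InvMax xs i g) :
    InvMax xs (i+1) (if xs.getD g 0 < xs.getD (i+1) 0 then i+1 else g) := by
  obtain ⟨hgi, hval, hub, hlt⟩ := hI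
  by_cases hc : xs.getD g 0 < xs.getD (i+1) 0
  · simp only [if_pos hc]
    refine ⟨le_refl _, ?_, ?_, ?_⟩
    · rw [prefMax_getD_succ xs i h, hval]; exact max_eq_right (le_of_lt hc)
    · intro k hk
      rcases Nat.lt_or_ge k (i+1) with hk' | hk'
      · exact le_of_lt (lt_of_le_of_lt (hub k (Nat.lt_succ_iff.mp hk')) hc)
      · have : k = i + 1 := by omega
        simp [this]
    · intro k hk
      exact lt_of_le_of_lt (hub k (Nat.lt_succ_iff.mp hk)) hc
  · simp only [if_neg hc]
    refine ⟨Nat.le_succ_of_le hgi, ?_, ?_, hlt⟩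
    · rw [prefMax_getD_succ xs i h, hval]; exact max_eq_left (not_lt.mp hc)
    · intro k hk
      rcases Nat.lt_or_ge k (i+1) with hk' | hk'
      · exact hub k (Nat.lt_succ_iff.mp hk')
      · have : k = i + 1 := by omega
        rw [this]; exact not_lt.mp hc

theorem findIdx_eq_of (l : List Int) (v : Int) : ∀ (g : Nat), g < l.length →
    l.getD g 0 = v → (∀ k, k < g → l.getD k 0 ≠ v) → l.findIdx (· == v) = g := by
  induction l with
  | nil => intro g hg; simp at hg
  | cons x xs ih =>
    intro g hg hv hb
    cases g with
    | zero =>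
      simp only [List.getD_cons_zero] at hv
      simp [List.findIdx_cons, hv]
    | succ g =>
      have hx : x ≠ v := hb 0 (Nat.succ_pos g)
      have := ih g (by simpa using hg) (by simpa using hv)
        (fun k hk => by simpa using hb (k+1) (by omega))
      simp [List.findIdx_cons, beq_eq_false_iff_ne.mpr hx, this]

theorem getD_drop (l : List Int) (L k : Nat) :
    (l.drop L).getD k 0 = l.getD (L + k) 0 := by
  simp [List.getD_eq_getElem?_getD, List.getElem?_drop]

theorem getD_take (l : List Int) (n k : Nat) (h : k < n) :
    (l.take n).getD k 0 = l.getD k 0 := by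
  simp [List.getD_eq_getElem?_getD, List.getElem?_take_of_lt h]

theorem zipWith_getD (f : Int → Int → Bool) (l1 l2 : List Int) (i : Nat)
    (h1 : i < l1.length) (h2 : i < l2.length) :
    (List.zipWith f l1 l2).getD i false = f (l1.getD i 0) (l2.getD i 0) := by
  have hz : i < (List.zipWith f l1 l2).length := by simp [List.length_zipWith]; omega
  rw [List.getD_eq_getElem _ _ hz, List.getElem_zipWith,
      List.getD_eq_getElem _ _ h1, List.getD_eq_getElem _ _ h2]


-- proof-local abbreviations for B's per-L lists
def tcof (C : List Int) (L : Nat) : List Int := C.drop L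
def tdof (C D : List Int) (L : Nat) : List Int := (D.drop L).take (C.length - L)
def fairof (C D : List Int) (K : Int) (L : Nat) : List Bool :=
  List.zipWith (fun a b => decide (|a - b| ≤ K)) (prefMax (tcof C L)) (prefMax (tdof C D L))

theorem len_tc (C : List Int) (L : Nat) : (tcof C L).length = C.length - L := by
  simp [tcof]

theorem len_td (C D : List Int) (L : Nat) (hPre : C.length ≤ D.length) :
    (tdof C D L).length = C.length - L := by
  simp [tdof]; omega

theorem len_fair (C D : List Int) (K : Int) (L : Nat) (hPre : C.length ≤ D.length) :
    (fairof C D K L).length = C.length - L := by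
  simp [fairof, List.length_zipWith, length_prefMax, len_tc, len_td C D L hPre]

theorem fair_getD (C D : List Int) (K : Int) (L i : Nat) (hPre : C.length ≤ D.length)
    (hi : i < C.length - L) :
    (fairof C D K L).getD i false =
      decide (|(prefMax (tcof C L)).getD i 0 - (prefMax (tdof C D L)).getD i 0| ≤ K) := by
  exact zipWith_getD _ _ _ i (by rw [length_prefMax, len_tc]; omega)
    (by rw [length_prefMax, len_td C D L hPre]; omega)

theorem fair_drop_cons (C D : List Int) (K : Int) (L i : Nat) (hPre : C.length ≤ D.length)
    (hi : i < C.length - L) :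
    (fairof C D K L).drop i = (fairof C D K L).getD i false :: (fairof C D K L).drop (i+1) := by
  have h : i < (fairof C D K L).length := by rw [len_fair C D K L hPre]; omega
  rw [List.drop_eq_getElem_cons h, List.getD_eq_getElem _ _ h]

theorem tc_getD (C : List Int) (L k : Nat) : (tcof C L).getD k 0 = C.getD (L + k) 0 := by
  simp [tcof, getD_drop]

theorem td_getD (C D : List Int) (L k : Nat) (hk : k < C.length - L) :
    (tdof C D L).getD k 0 = D.getD (L + k) 0 := by
  rw [tdof, getD_take _ _ _ hk, getD_drop]

theorem loop2_res (C D : List Int) (K : Int) (L : Nat) (hPre : C.length ≤ D.length) :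
    ∀ (fuel i c d : Nat), i < C.length - L → C.length - L ≤ fuel + i →
    C.getD c 0 = (prefMax (tcof C L)).getD i 0 →
    D.getD d 0 = (prefMax (tdof C D L)).getD i 0 →
    (fairLoop2 C D K C.length fuel c d (L + i)).2.2 =
      (match ((fairof C D K L).drop i).findIdx? (· == false) with
       | some t => L + (i + t)
       | none => C.length) := by
  intro fuel
  induction fuel with
  | zero => intro i c d hi hfuel; omega
  | succ fuel ih =>
    intro i c d hi hfuel hc hd
    have hdc := fair_drop_cons C D K L i hPre hi
    have hgd := fair_getD C D K L i hPre hi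
    by_cases hcnd : |C.getD c 0 - D.getD d 0| ≤ K
    · -- loop continues
      have hhead : (fairof C D K L).getD i false = true := by
        rw [hgd, ← hc, ← hd]; simpa using hcnd
      by_cases hend : C.length ≤ L + i + 1
      · -- R+1 hits the end: loop breaks with R = len
        have hdrop : (fairof C D K L).drop (i+1) = [] := by
          apply List.drop_eq_nil_of_le
          rw [len_fair C D K L hPre]; omega
        rw [hdc, hhead, hdrop]
        simp only [fairLoop2, if_pos hcnd, if_pos hend, List.findIdx?_cons, List.findIdx?_nil]
        simp; omega
      · -- recursive step
        have hi1 : i + 1 < C.length - L := by omega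
        have hstep_c : C.getD (if C.getD c 0 < C.getD (L+i+1) 0 then L+i+1 else c) 0 =
            (prefMax (tcof C L)).getD (i+1) 0 := by
          have hx : C.getD (L+i+1) 0 = (tcof C L).getD (i+1) 0 := by
            rw [tc_getD, Nat.add_assoc]
          have hmax : (prefMax (tcof C L)).getD (i+1) 0 =
              max ((prefMax (tcof C L)).getD i 0) ((tcof C L).getD (i+1) 0) :=
            prefMax_getD_succ _ i (by rw [len_tc]; omega)
          rw [hmax, ← hc]
          split_ifs with hlt
          · rw [hx] at hlt ⊢
            exact (max_eq_right (le_of_lt hlt)).symm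
          · exact (max_eq_left (by rw [hx] at hlt; exact not_lt.mp hlt)).symm
        have hstep_d : D.getD (if D.getD d 0 < D.getD (L+i+1) 0 then L+i+1 else d) 0 =
            (prefMax (tdof C D L)).getD (i+1) 0 := by
          have hx : D.getD (L+i+1) 0 = (tdof C D L).getD (i+1) 0 := by
            rw [td_getD C D L (i+1) hi1, Nat.add_assoc]
          have hmax : (prefMax (tdof C D L)).getD (i+1) 0 =
              max ((prefMax (tdof C D L)).getD i 0) ((tdof C D L).getD (i+1) 0) :=
            prefMax_getD_succ _ i (by rw [len_td C D L hPre]; omega)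
          rw [hmax, ← hd]
          split_ifs with hlt
          · rw [hx] at hlt ⊢
            exact (max_eq_right (le_of_lt hlt)).symm
          · exact (max_eq_left (by rw [hx] at hlt; exact not_lt.mp hlt)).symm
        have key : (fairLoop2 C D K C.length fuel
            (if C.getD c 0 < C.getD (L+i+1) 0 then L+i+1 else c)
            (if D.getD d 0 < D.getD (L+i+1) 0 then L+i+1 else d) (L+i+1)).2.2 =
            (match ((fairof C D K L).drop (i+1)).findIdx? (· == false) with
             | some t => L + (i + 1 + t)
             | none => C.length) :=
          ih (i+1) _ _ hi1 (by omega) hstep_c hstep_d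
        rw [hdc, hhead]
        simp only [fairLoop2, if_pos hcnd, if_neg hend, List.findIdx?_cons]
        rw [key]
        cases hf : ((fairof C D K L).drop (i+1)).findIdx? (· == false) with
        | none => simp [hf]
        | some t => simp [hf]; omega
    · -- loop exits immediately: R stays L+i
      have hhead : (fairof C D K L).getD i false = false := by
        rw [hgd, ← hc, ← hd]; simpa using hcnd
      rw [hdc, hhead]
      simp only [fairLoop2, if_neg hcnd, List.findIdx?_cons]
      simp

theorem loop1_char (C D : List Int) (K : Int) (L : Nat) (hPre : C.length ≤ D.length) :
    ∀ (fuel i gc gd : Nat), i < C.length - L → C.length - L ≤ fuel + i →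
    InvMax (tcof C L) i gc → InvMax (tdof C D L) i gd →
    (match ((fairof C D K L).drop i).findIdx? (· == true) with
     | some t => ∃ gc' gd',
        fairLoop1 C D K C.length fuel (L+gc) (L+gd) (L+i) = (L+gc', L+gd', L+(i+t)) ∧
        InvMax (tcof C L) (i+t) gc' ∧ InvMax (tdof C D L) (i+t) gd'
     | none => ∃ c' d',
        fairLoop1 C D K C.length fuel (L+gc) (L+gd) (L+i) = (c', d', C.length) ∧
        K < |C.getD c' 0 - D.getD d' 0|) := by
  intro fuel
  induction fuel with
  | zero => intro i gc gd hi hfuel; omega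
  | succ fuel ih =>
    intro i gc gd hi hfuel hic hid
    have hvc : C.getD (L+gc) 0 = (prefMax (tcof C L)).getD i 0 := by
      rw [← tc_getD]; exact hic.2.1.symm
    have hgdm : gd < C.length - L := Nat.lt_of_le_of_lt hid.1 hi
    have hvd : D.getD (L+gd) 0 = (prefMax (tdof C D L)).getD i 0 := by
      rw [← td_getD C D L gd hgdm]; exact hid.2.1.symm
    have hdc := fair_drop_cons C D K L i hPre hi
    have hgd := fair_getD C D K L i hPre hi
    by_cases hcnd : K < |C.getD (L+gc) 0 - D.getD (L+gd) 0|
    · -- still unfair: loop advances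
      have hhead : (fairof C D K L).getD i false = false := by
        rw [hgd, ← hvc, ← hvd]; simpa using not_le.mpr hcnd
      by_cases hend : C.length ≤ L + i + 1
      · -- R+1 hits the end: break, still unfair
        have hdrop : (fairof C D K L).drop (i+1) = [] := by
          apply List.drop_eq_nil_of_le
          rw [len_fair C D K L hPre]; omega
        rw [hdc, hhead, hdrop]
        simp only [fairLoop1, if_pos hcnd, if_pos hend, List.findIdx?_cons, List.findIdx?_nil]
        simp only [show ((false == true) = true) = False by simp, if_false, Option.map_none]
        refine ⟨L+gc, L+gd, ?_, hcnd⟩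
        have : L + i + 1 = C.length := by omega
        rw [this]
      · -- advance one step
        have hi1 : i + 1 < C.length - L := by omega
        have harg_c : (if C.getD (L+gc) 0 < C.getD (L+i+1) 0 then L+i+1 else L+gc) =
            L + (if (tcof C L).getD gc 0 < (tcof C L).getD (i+1) 0 then i+1 else gc) := by
          rw [tc_getD C L gc, tc_getD C L (i+1)]
          simp only [← Nat.add_assoc]
          split_ifs <;> omega
        have harg_d : (if D.getD (L+gd) 0 < D.getD (L+i+1) 0 then L+i+1 else L+gd) =
            L + (if (tdof C D L).getD gd 0 < (tdof C D L).getD (i+1) 0 then i+1 else gd) := by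
          rw [td_getD C D L gd hgdm, td_getD C D L (i+1) hi1]
          simp only [← Nat.add_assoc]
          split_ifs <;> omega
        have hinvc' := invMax_step (tcof C L) i gc (by rw [len_tc]; omega) hic
        have hinvd' := invMax_step (tdof C D L) i gd (by rw [len_td C D L hPre]; omega) hid
        have key := ih (i+1) _ _ hi1 (by omega) hinvc' hinvd'
        rw [hdc, hhead]
        simp only [fairLoop1, if_pos hcnd, if_neg hend, List.findIdx?_cons]
        simp only [show ((false == true) = true) = False by simp, if_false]
        rw [harg_c, harg_d]
        cases hf : ((fairof C D K L).drop (i+1)).findIdx? (· == true) with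
        | none =>
          rw [hf] at key
          simpa using key
        | some t =>
          rw [hf] at key
          obtain ⟨gc', gd', hres, hic', hid'⟩ := key
          refine ⟨gc', gd', ?_, ?_, ?_⟩
          · have he : i + (t+1) = i + 1 + t := by omega
            simp only [Option.map_some, he]
            exact hres
          · have he : i + (t+1) = i + 1 + t := by omega
            rw [he]; exact hic'
          · have he : i + (t+1) = i + 1 + t := by omega
            rw [he]; exact hid'
    · -- fair now: loop exits with current state
      have hhead : (fairof C D K L).getD i false = true := by
        rw [hgd, ← hvc, ← hvd]; simpa using not_lt.mp hcnd
      rw [hdc, hhead]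
      simp only [fairLoop1, if_neg hcnd, List.findIdx?_cons]
      simp only [show ((true == true) = true) = True by simp, if_true]
      exact ⟨gc, gd, rfl, hic, hid⟩

-- per-L contribution of A's outer loop body
def contribA (C D : List Int) (K : Int) (L : Nat) : Int :=
  let s := fairLoop1 C D K C.length C.length L L L
  if K < |C.getD s.1 0 - D.getD s.2.1 0| then 0
  else ((min s.1 s.2.1 : Int) - (L : Int) + 1) *
       (((fairLoop2 C D K C.length C.length s.1 s.2.1 s.2.2).2.2 : Int) - (max s.1 s.2.1 : Int))

-- per-L contribution of B's fold body
def contribB (C D : List Int) (K : Int) (L : Nat) : Int :=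
  match (fairof C D K L).findIdx? (· == true) with
  | none => 0
  | some j =>
    let cmax := L + ((C.drop L).take (j+1)).findIdx (· == (prefMax (C.drop L)).getD j 0)
    let dmax := L + ((D.drop L).take (j+1)).findIdx (· == (prefMax ((D.drop L).take (C.length - L))).getD j 0)
    let j2 := match ((fairof C D K L).drop (j+1)).findIdx? (· == false) with
              | some t => j + 1 + t
              | none => C.length - L
    ((min cmax dmax : Int) - (L : Int) + 1) * (((L + j2 : Nat) : Int) - (max cmax dmax : Int))

theorem fairOuter_sum (C D : List Int) (K : Int) :
    ∀ (fuel L : Nat) (count : Int), C.length ≤ fuel + L →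
    fairOuter C D K C.length fuel L count =
      count + ((List.range' L (C.length - L)).map (contribA C D K)).sum := by
  intro fuel
  induction fuel with
  | zero =>
    intro L count h
    have : C.length - L = 0 := by omega
    simp [fairOuter, this]
  | succ fuel ih =>
    intro L count h
    by_cases hL : L < C.length
    · have hm : C.length - L = (C.length - (L+1)) + 1 := by omega
      rw [hm, List.range'_succ]
      by_cases hu : K < |C.getD (fairLoop1 C D K C.length C.length L L L).1 0 -
          D.getD (fairLoop1 C D K C.length C.length L L L).2.1 0|
      · have hA : contribA C D K L = 0 := by simp only [contribA]; rw [if_pos hu]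
        simp only [fairOuter, if_pos hL, if_pos hu]
        rw [ih (L+1) count (by omega), List.map_cons, List.sum_cons, hA]
        ring
      · have hA : contribA C D K L =
            ((min (fairLoop1 C D K C.length C.length L L L).1 (fairLoop1 C D K C.length C.length L L L).2.1 : Int) - (L : Int) + 1) *
            (((fairLoop2 C D K C.length C.length (fairLoop1 C D K C.length C.length L L L).1
                (fairLoop1 C D K C.length C.length L L L).2.1
                (fairLoop1 C D K C.length C.length L L L).2.2).2.2 : Int) -
              (max (fairLoop1 C D K C.length C.length L L L).1 (fairLoop1 C D K C.length C.length L L L).2.1 : Int)) := by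
          simp only [contribA]; rw [if_neg hu]
        simp only [fairOuter, if_pos hL, if_neg hu]
        rw [ih (L+1) _ (by omega), List.map_cons, List.sum_cons, hA]
        push_cast
        ring
    · have : C.length - L = 0 := by omega
      simp [fairOuter, hL, this]

theorem alt_sum (C D : List Int) (K : Int) :
    fair_fight_alt C D K = ((List.range C.length).map (contribB C D K)).sum := by
  rw [fair_fight_alt]
  have hbody : ∀ (l : List Nat) (init : Int),
      l.foldl (fun total L =>
        let n := C.length
        let mc := prefMax (C.drop L)
        let md := prefMax ((D.drop L).take (n - L))
        let fair := List.zipWith (fun a b => decide (|a - b| ≤ K)) mc md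
        match fair.findIdx? (· == true) with
        | none => total
        | some j =>
          let cmax := L + ((C.drop L).take (j+1)).findIdx (· == mc.getD j 0)
          let dmax := L + ((D.drop L).take (j+1)).findIdx (· == md.getD j 0)
          let j2 := match (fair.drop (j+1)).findIdx? (· == false) with
                    | some t => j + 1 + t
                    | none => n - L
          total + ((min cmax dmax : Int) - (L : Int) + 1) * (((L + j2 : Nat) : Int) - (max cmax dmax : Int))) init
      = init + (l.map (contribB C D K)).sum := by
    intro l
    induction l with
    | nil => intro init; simp
    | cons x xs ihl =>
      intro init
      rw [List.foldl_cons, ihl, List.map_cons, List.sum_cons]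
      have hstep : ∀ (total : Int),
          (let n := C.length
           let mc := prefMax (C.drop x)
           let md := prefMax ((D.drop x).take (n - x))
           let fair := List.zipWith (fun a b => decide (|a - b| ≤ K)) mc md
           match fair.findIdx? (· == true) with
           | none => total
           | some j =>
             let cmax := x + ((C.drop x).take (j+1)).findIdx (· == mc.getD j 0)
             let dmax := x + ((D.drop x).take (j+1)).findIdx (· == md.getD j 0)
             let j2 := match (fair.drop (j+1)).findIdx? (· == false) with
                       | some t => j + 1 + t
                       | none => n - x
             total + ((min cmax dmax : Int) - (x : Int) + 1) * (((x + j2 : Nat) : Int) - (max cmax dmax : Int)))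
          = total + contribB C D K x := by
        intro total
        simp only [contribB, fairof, tcof, tdof]
        cases hj : (List.zipWith (fun a b => decide (|a - b| ≤ K)) (prefMax (C.drop x))
            (prefMax ((D.drop x).take (C.length - x)))).findIdx? (· == true) with
        | none => simp
        | some j => simp
      rw [hstep]
      ring
  rw [hbody]
  simp

theorem contrib_eq (C D : List Int) (K : Int) (L : Nat) (hPre : C.length ≤ D.length)
    (hL : L < C.length) : contribA C D K L = contribB C D K L := by
  have h0 : 0 < C.length - L := by omega
  have h1 := loop1_char C D K L hPre C.length 0 0 0 h0 (by omega) (invMax_zero _) (invMax_zero _)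
  rw [List.drop_zero] at h1
  cases hj : (fairof C D K L).findIdx? (· == true) with
  | none =>
    rw [hj] at h1
    obtain ⟨c', d', hres, hunf⟩ := h1
    have hres' : fairLoop1 C D K C.length C.length L L L = (c', d', C.length) := hres
    simp only [contribA, contribB, hj, hres']
    rw [if_pos hunf]
  | some j =>
    rw [hj] at h1
    simp only [Nat.zero_add] at h1
    obtain ⟨gc, gd, hres, hic, hid⟩ := h1
    have hres' : fairLoop1 C D K C.length C.length L L L = (L+gc, L+gd, L+j) := hres
    have hjg := hj
    rw [List.findIdx?_eq_some_iff_getElem] at hjg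
    obtain ⟨hjlen, hjp, _⟩ := hjg
    have hjm : j < C.length - L := by rw [len_fair C D K L hPre] at hjlen; exact hjlen
    have hfj : (fairof C D K L).getD j false = true := by
      rw [List.getD_eq_getElem _ _ hjlen]; simpa using hjp
    have hfairj : |(prefMax (tcof C L)).getD j 0 - (prefMax (tdof C D L)).getD j 0| ≤ K := by
      have h := (fair_getD C D K L j hPre hjm).symm.trans hfj
      simpa using h
    have hgcj : gc ≤ j := hic.1
    have hgdj : gd ≤ j := hid.1
    have hvc : C.getD (L+gc) 0 = (prefMax (tcof C L)).getD j 0 := by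
      rw [← tc_getD]; exact hic.2.1.symm
    have hvd : D.getD (L+gd) 0 = (prefMax (tdof C D L)).getD j 0 := by
      rw [← td_getD C D L gd (by omega)]; exact hid.2.1.symm
    have hcond : ¬ K < |C.getD (L+gc) 0 - D.getD (L+gd) 0| := by
      rw [hvc, hvd]; exact not_lt.mpr hfairj
    have hcmax : ((C.drop L).take (j+1)).findIdx (· == (prefMax (C.drop L)).getD j 0) = gc := by
      show ((tcof C L).take (j+1)).findIdx (· == (prefMax (tcof C L)).getD j 0) = gc
      apply findIdx_eq_of
      · rw [List.length_take, len_tc]; omega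
      · rw [getD_take _ _ _ (by omega : gc < j+1), hic.2.1]
      · intro k hk
        rw [getD_take _ _ _ (by omega : k < j+1), hic.2.1]
        exact ne_of_lt (hic.2.2.2 k hk)
    have hdmax : ((D.drop L).take (j+1)).findIdx
        (· == (prefMax ((D.drop L).take (C.length - L))).getD j 0) = gd := by
      show ((D.drop L).take (j+1)).findIdx (· == (prefMax (tdof C D L)).getD j 0) = gd
      apply findIdx_eq_of
      · rw [List.length_take, List.length_drop]; omega
      · rw [getD_take _ _ _ (by omega : gd < j+1),
            ← getD_take (D.drop L) (C.length - L) gd (by omega), hid.2.1]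
        rfl
      · intro k hk
        rw [getD_take _ _ _ (by omega : k < j+1),
            ← getD_take (D.drop L) (C.length - L) k (by omega), hid.2.1]
        exact ne_of_lt (hid.2.2.2 k hk)
    have hl2 := loop2_res C D K L hPre C.length j (L+gc) (L+gd) hjm (by omega) hvc hvd
    rw [fair_drop_cons C D K L j hPre hjm, hfj] at hl2
    simp only [List.findIdx?_cons] at hl2
    simp only [show ((true == false) = true) = False by simp, if_false] at hl2
    simp only [contribA, contribB, hj, hres']
    rw [if_neg hcond]
    rw [hcmax, hdmax, hl2]
    cases hf2 : ((fairof C D K L).drop (j+1)).findIdx? (· == false) with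
    | some t =>
      simp only [Option.map_some]
      have e : j + (t+1) = j + 1 + t := by omega
      rw [e]
    | none =>
      simp only [Option.map_none]
      have e : L + (C.length - L) = C.length := by omega
      rw [e]

-- ===== VERDICT (by name: the statement is the Claim_ definition above) =====
theorem fair_fight_spec : Claim_equal_fair_fight := by
  unfold Claim_equal_fair_fight
  intro C D K _ hPre
  unfold Spec_fair_fight
  unfold Pre_fair_fight at hPre
  rw [fair_fight, fairOuter_sum C D K C.length 0 0 (by omega), alt_sum, zero_add,
      List.range_eq_range']
  simp only [Nat.sub_zero]
  exact congrArg List.sum (List.map_congr_left (fun l hl =>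
    contrib_eq C D K l hPre (by
      have := List.mem_range'_1.mp hl
      omega)))
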